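-- pv_equiv track=rewrite | github.com/ocozalp/aoc-2020 | q20.py | search_for_monster
-- ===== SOURCE A (Python) =====
-- def search_for_monster(img):
--   MONSTER_LEN = 20
--   diffs = [
--     (0, 0), (1, 1), (1, 4), (0, 5), (0, 6), (1, 7), (1, 10), (0, 11), (0, 12), (1, 13), (1, 16), (0, 17),
--     (-1, 18), (0, 18), (0, 19)
--   ]
--   elms = set()
--   for i, row in enumerate(img):
--     if i == 0 or i == len(img) - 1:
--       continue
--
--     for j in range(len(row)):
--       if j + MONSTER_LEN-1 >= len(row):
--         break
--
--       found = True
--       for diff in diffs: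
--         r, c = diff
--         if img[i + r][j + c] != '#':
--           found = False
--           break
--
--       if found:
--         for diff in diffs:
--           r, c = diff
--           elms.add((i+r, j+c))
--
--   if len(elms) == 0:
--     return - 1
--
--   total_count = sum([len([c for c in row if c == '#']) for row in img])
--   return total_count - len(elms)
-- ===== SOURCE B (Python) =====
-- def search_for_monster(img):
--   diffs = [
--     (0, 0), (1, 1), (1, 4), (0, 5), (0, 6), (1, 7), (1, 10), (0, 11), (0, 12), (1, 13), (1, 16), (0, 17),
--     (-1, 18), (0, 18), (0, 19)
--   ]
--   coords = {(i, j) for i, row in enumerate(img) for j, ch in enumerate(row) if ch == '#'}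
--   occupied = set()
--   for (i, j) in coords:
--     cells = [(i + r, j + c) for (r, c) in diffs]
--     if all(cell in coords for cell in cells):
--       occupied.update(cells)
--   if not occupied:
--     return -1
--   return len(coords) - len(occupied)
-- ===== Notes on version B (the rewrite author's own statement) =====
-- stated objective: idiomatic
-- what changed: Instead of scanning every grid cell of every interior row and probing 15 characters by index, B builds the set of all '#' coordinates in one pass and tests each '#' coordinate as a monster anchor purely by set membership (which also subsumes A's explicit row-skip and column-bound checks), collecting occupied cells into a set and returning len(coords)-len(occupied).
-- crash fix: On ragged images where a monster probe reads past the end of a shorter neighbouring row after all earlier offsets matched '#', A raises IndexError; B returns the ordinary count (the membership test simply fails there). — e.g. on search_for_monster(["x", "####################", ""]): A raises IndexError, B returns -1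
import Mathlib
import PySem

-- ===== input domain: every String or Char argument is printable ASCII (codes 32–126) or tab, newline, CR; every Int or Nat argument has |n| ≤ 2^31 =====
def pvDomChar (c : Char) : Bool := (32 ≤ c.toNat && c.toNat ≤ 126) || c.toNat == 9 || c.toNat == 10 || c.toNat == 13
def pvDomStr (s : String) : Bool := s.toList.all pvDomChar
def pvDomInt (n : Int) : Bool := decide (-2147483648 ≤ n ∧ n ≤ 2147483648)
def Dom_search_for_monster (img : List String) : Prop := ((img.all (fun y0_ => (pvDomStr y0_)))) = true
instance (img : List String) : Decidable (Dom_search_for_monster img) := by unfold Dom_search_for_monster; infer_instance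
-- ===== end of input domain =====

-- B replaces A's scan of every grid cell (with per-cell character probes) by one pass that collects the
-- set of '#' coordinates and then tests monster anchors by set membership (objective: idiomatic/alternative).

-- ===== PORT A =====
def pvDiffsA : List (Int × Int) :=
  [(0, 0), (1, 1), (1, 4), (0, 5), (0, 6), (1, 7), (1, 10), (0, 11), (0, 12), (1, 13), (1, 16), (0, 17),
   (-1, 18), (0, 18), (0, 19)]

-- img[r][c] ; `none` is exactly where Python raises IndexError (excluded by Pre_); the port treats that
-- probe as a mismatch, which agrees with Python everywhere A returns.
def pvCharA (img : List String) (r c : Int) : Option Char :=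
  match PySem.List.pyGet? img r with
  | some row => PySem.Str.pyGet? row c
  | none => none

-- literal port of A; the inner `for j in range(len(row)): if j+20-1 >= len(row): break` is the fold over
-- the takeWhile-prefix of range(len(row))
def search_for_monster (img : List String) : Int :=
  let elms : PySem.Set (Int × Int) :=
    (PySem.List.enumerate img).foldl (fun elms p =>
      if p.1 = 0 ∨ p.1 = (img.length : Int) - 1 then elms
      else
        ((PySem.List.pyRange 0 (p.2.toList.length : Int) 1).takeWhile
            (fun j => decide (j + 20 - 1 < (p.2.toList.length : Int)))).foldl
          (fun elms j =>
            let found := pvDiffsA.all (fun d => pvCharA img (p.1 + d.1) (j + d.2) == some '#')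
            if found then
              pvDiffsA.foldl (fun e d => PySem.Set.add e (p.1 + d.1, j + d.2)) elms
            else elms) elms) PySem.Set.empty
  if elms.length = 0 then (-1 : Int)
  else
    ((img.map (fun row => ((row.toList.filter (fun c => c == '#')).length : Int))).sum) - (elms.length : Int)

-- ===== PORT B =====
def pvDiffsB : List (Int × Int) :=
  [(0, 0), (1, 1), (1, 4), (0, 5), (0, 6), (1, 7), (1, 10), (0, 11), (0, 12), (1, 13), (1, 16), (0, 17),
   (-1, 18), (0, 18), (0, 19)]

-- {(i, j) for i, row in enumerate(img) for j, ch in enumerate(row) if ch == '#'}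
def pvCoords (img : List String) : PySem.Set (Int × Int) :=
  PySem.Set.ofList ((PySem.List.enumerate img).flatMap (fun p =>
    (PySem.List.enumerate p.2.toList).filterMap (fun q =>
      if q.2 = '#' then some (p.1, q.1) else none)))

def search_for_monster_alt (img : List String) : Int :=
  let coords := pvCoords img
  let occupied : PySem.Set (Int × Int) :=
    coords.foldl (fun occ p =>
      let cells := pvDiffsB.map (fun d => (p.1 + d.1, p.2 + d.2))
      if cells.all (fun cell => PySem.Set.contains coords cell) then PySem.Set.update occ cells
      else occ) PySem.Set.empty
  if occupied.length = 0 then (-1 : Int)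
  else (coords.length : Int) - (occupied.length : Int)

-- ===== PRECONDITION & SPEC =====
def pvDiffsP : List (Int × Int) :=
  [(0, 0), (1, 1), (1, 4), (0, 5), (0, 6), (1, 7), (1, 10), (0, 11), (0, 12), (1, 13), (1, 16), (0, 17),
   (-1, 18), (0, 18), (0, 19)]

def pvProbeP (img : List String) (i j : Int) (d : Int × Int) : Option Char :=
  match PySem.List.pyGet? img (i + d.1) with
  | some row => PySem.Str.pyGet? row (j + d.2)
  | none => none

-- Pre_ excludes exactly the inputs on which Python A raises IndexError: a ragged image where a monster
-- probe reads past the end of a shorter neighbouring row after every earlier offset matched '#'.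
def Pre_search_for_monster (img : List String) : Prop :=
  ∀ i ∈ List.range img.length, 1 ≤ i → i + 1 < img.length →
    ∀ j ∈ List.range (img.getD i "").toList.length,
      j + 19 < (img.getD i "").toList.length →
      ∀ k ∈ List.range pvDiffsP.length,
        (∀ d ∈ pvDiffsP.take k, pvProbeP img (i : Int) (j : Int) d = some '#') →
        pvProbeP img (i : Int) (j : Int) (pvDiffsP.getD k (0, 0)) ≠ none
instance (img : List String) : Decidable (Pre_search_for_monster img) := by
  unfold Pre_search_for_monster; infer_instance

def pvWitness_search_for_monster : List String := ["..", ".."]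

-- Python A raises IndexError on the excluded ragged images; B returns the ordinary count (no monster
-- can be anchored at a probe that would fall off a row, so membership simply fails there).
def Raises_search_for_monster (img : List String) : Prop :=
  ∃ i ∈ List.range img.length, 1 ≤ i ∧ i + 1 < img.length ∧
    ∃ j ∈ List.range (img.getD i "").toList.length,
      j + 19 < (img.getD i "").toList.length ∧
      ∃ k ∈ List.range pvDiffsP.length,
        (∀ d ∈ pvDiffsP.take k, pvProbeP img (i : Int) (j : Int) d = some '#') ∧
        pvProbeP img (i : Int) (j : Int) (pvDiffsP.getD k (0, 0)) = none
instance (img : List String) : Decidable (Raises_search_for_monster img) := by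
  unfold Raises_search_for_monster; infer_instance

def pvRaiseWitness_search_for_monster : List String := ["x", "####################", ""]
def pvRaiseWitnessOut_search_for_monster : Int := -1

def Spec_search_for_monster (img : List String) (out : Int) : Prop := out = search_for_monster_alt img
instance (img : List String) (out : Int) : Decidable (Spec_search_for_monster img out) := by unfold Spec_search_for_monster; infer_instance

-- ===== CLAIM (what is proved, stated in full; the proofs are below) =====
def Claim_equal_search_for_monster : Prop := ∀ (img : List String), Dom_search_for_monster img → Pre_search_for_monster img → Spec_search_for_monster img (search_for_monster img)

def Claim_raises_search_for_monster : Prop := (∀ (img : List String), Dom_search_for_monster img → Raises_search_for_monster img → ¬ Pre_search_for_monster img) ∧ (Dom_search_for_monster (pvRaiseWitness_search_for_monster) ∧ Raises_search_for_monster (pvRaiseWitness_search_for_monster) ∧ search_for_monster_alt (pvRaiseWitness_search_for_monster) = pvRaiseWitnessOut_search_for_monster)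

-- ===== LEMMAS AND PROOFS =====

-- the 15 cells a monster anchored at (i, j) covers
def pvCells (i j : Int) : List (Int × Int) := pvDiffsA.map (fun d => (i + d.1, j + d.2))

def pvFound (img : List String) (i j : Int) : Bool :=
  pvDiffsA.all (fun d => pvCharA img (i + d.1) (j + d.2) == some '#')

-- A finds a monster anchored at row i, column j (Nat indices)
def pvAnchor (img : List String) (i j : Nat) : Prop :=
  1 ≤ i ∧ i + 1 < img.length ∧ j + 19 < (img.getD i "").toList.length ∧
    pvFound img (i : Int) (j : Int) = true

theorem pv_mem_foldl_set {α : Type} (C : α → Int × Int → Prop)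
    (f : PySem.Set (Int × Int) → α → PySem.Set (Int × Int))
    (H : ∀ s x q, q ∈ f s x ↔ q ∈ s ∨ C x q) :
    ∀ (l : List α) (s0 : PySem.Set (Int × Int)) (q : Int × Int),
      q ∈ l.foldl f s0 ↔ q ∈ s0 ∨ ∃ x ∈ l, C x q := by
  intro l
  induction l with
  | nil => simp
  | cons x t ih =>
    intro s0 q
    rw [List.foldl_cons, ih, H]
    constructor
    · rintro (⟨h | h⟩ | ⟨y, hy, hC⟩)
      · exact Or.inl h
      · exact Or.inr ⟨x, by simp, h⟩
      · exact Or.inr ⟨y, by simp [hy], hC⟩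
    · rintro (h | ⟨y, hy, hC⟩)
      · exact Or.inl (Or.inl h)
      · rcases List.mem_cons.mp hy with rfl | hy
        · exact Or.inl (Or.inr hC)
        · exact Or.inr ⟨y, hy, hC⟩

theorem pv_mem_coords (img : List String) (q : Int × Int) :
    q ∈ pvCoords img ↔ 0 ≤ q.1 ∧ 0 ≤ q.2 ∧ pvCharA img q.1 q.2 = some '#' := by
  unfold pvCoords
  rw [PySem.Set.mem_ofList, List.mem_flatMap]
  constructor
  · rintro ⟨p, hp, hq⟩
    rw [PySem.List.mem_enumerate_iff] at hp
    obtain ⟨k, hk, rfl⟩ := hp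
    rw [List.mem_filterMap] at hq
    obtain ⟨e, he, hqe⟩ := hq
    rw [PySem.List.mem_enumerate_iff] at he
    obtain ⟨l, hl, rfl⟩ := he
    simp only [] at hqe
    split at hqe
    · rename_i hch
      cases hqe
      refine ⟨by positivity, by positivity, ?_⟩
      simp only [pvCharA, zero_add]
      rw [PySem.List.pyGet?_natCast]
      simp [List.getElem?_eq_getElem hk, List.getElem?_eq_getElem hl, hch]
    · cases hqe
  · rintro ⟨h1, h2, hc⟩
    unfold pvCharA at hc
    obtain ⟨row, hrow⟩ : ∃ row, PySem.List.pyGet? img q.1 = some row := by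
      cases h : PySem.List.pyGet? img q.1 with
      | none => rw [h] at hc; cases hc
      | some row => exact ⟨row, rfl⟩
    rw [hrow] at hc
    rw [PySem.List.pyGet?_of_nonneg img h1] at hrow
    have hkl : q.1.toNat < img.length := by
      by_contra hcon
      rw [List.getElem?_eq_none (by omega)] at hrow; cases hrow
    have hrow' : img[q.1.toNat] = row := by
      rw [List.getElem?_eq_getElem hkl] at hrow; exact Option.some_injective _ hrow
    have hc' : row.toList[q.2.toNat]? = some '#' := by
      have := hc
      simp only [PySem.Str.pyGet?_eq] at this
      rw [PySem.Chars.pyGet?_eq_listPyGet?, PySem.List.pyGet?_of_nonneg row.toList h2] at this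
      exact this
    have hl2 : q.2.toNat < row.toList.length := by
      by_contra hcon
      rw [List.getElem?_eq_none (by omega)] at hc'; cases hc'
    have hl2' : q.2.toNat < img[q.1.toNat].toList.length := by rw [hrow']; exact hl2
    have hch : img[q.1.toNat].toList[q.2.toNat]'hl2' = '#' := by
      have h3 := hc'
      rw [List.getElem?_eq_getElem hl2] at h3
      have h4 : row.toList[q.2.toNat]'hl2 = '#' := Option.some_injective _ h3
      simp only [hrow']
      exact h4
    refine ⟨((q.1.toNat : Int), img[q.1.toNat]), ?_, ?_⟩
    · rw [PySem.List.mem_enumerate_iff]; exact ⟨q.1.toNat, hkl, by simp⟩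
    · rw [List.mem_filterMap]
      refine ⟨((q.2.toNat : Int), img[q.1.toNat].toList[q.2.toNat]'hl2'), ?_, ?_⟩
      · rw [PySem.List.mem_enumerate_iff]; exact ⟨q.2.toNat, hl2', by simp⟩
      · have e1 : (q.1.toNat : Int) = q.1 := by omega
        have e2 : (q.2.toNat : Int) = q.2 := by omega
        simp [hch, e1, e2]

theorem pv_range_takeWhile : ∀ (n k : Nat), (List.range n).takeWhile (fun a => decide (a < k)) = List.range (min n k) := by
  intro n
  induction n with
  | zero => simp
  | succ m ih =>
    intro k
    cases k with
    | zero => simp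
    | succ k' =>
      rw [List.range_succ_eq_map, List.takeWhile_cons]
      simp only [Nat.zero_lt_succ, decide_true, List.takeWhile_map]
      have hpred : ((fun a => decide (a < k' + 1)) ∘ Nat.succ) = (fun a => decide (a < k')) := by
        funext a; simp
      rw [hpred, ih k']
      have : min (m + 1) (k' + 1) = min m k' + 1 := by omega
      rw [this, List.range_succ_eq_map]
      simp

theorem pv_mem_takeWhile (m : Nat) (x : Int) :
    x ∈ (PySem.List.pyRange 0 (m : Int) 1).takeWhile (fun j => decide (j + 20 - 1 < (m : Int)))
      ↔ ∃ jN : Nat, x = (jN : Int) ∧ jN + 19 < m := by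
  rw [PySem.List.pyRange_zero_natCast, List.takeWhile_map]
  have hpred : ((fun j => decide (j + 20 - 1 < (m : Int))) ∘ (fun (k : Nat) => (k : Int)))
      = (fun (a : Nat) => decide (a < m - 19)) := by
    funext a
    simp only [Function.comp_apply, decide_eq_decide]
    omega
  rw [hpred, pv_range_takeWhile, List.mem_map]
  constructor
  · rintro ⟨a, ha, rfl⟩
    simp only [List.mem_range] at ha
    exact ⟨a, rfl, by omega⟩
  · rintro ⟨jN, rfl, hj⟩
    exact ⟨jN, by simp [List.mem_range]; omega, rfl⟩

theorem pv_char_lt (img : List String) (r c : Int) (ch : Char)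
    (h : pvCharA img r c = some ch) (hr : 0 ≤ r) (hc : 0 ≤ c) :
    r.toNat < img.length ∧ c.toNat < (img.getD r.toNat "").toList.length := by
  unfold pvCharA at h
  obtain ⟨row, hrow⟩ : ∃ row, PySem.List.pyGet? img r = some row := by
    cases hx : PySem.List.pyGet? img r with
    | none => rw [hx] at h; cases h
    | some row => exact ⟨row, rfl⟩
  rw [hrow] at h
  rw [PySem.List.pyGet?_of_nonneg img hr] at hrow
  have hlt : r.toNat < img.length := by
    by_contra hcon
    rw [List.getElem?_eq_none (by omega)] at hrow; cases hrow
  have hrow' : img[r.toNat] = row := by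
    rw [List.getElem?_eq_getElem hlt] at hrow; exact Option.some_injective _ hrow
  have h2 : row.toList[c.toNat]? = some ch := by
    simp only [PySem.Str.pyGet?_eq] at h
    rw [PySem.Chars.pyGet?_eq_listPyGet?, PySem.List.pyGet?_of_nonneg row.toList hc] at h
    exact h
  have hlt2 : c.toNat < row.toList.length := by
    by_contra hcon
    rw [List.getElem?_eq_none (by omega)] at h2; cases h2
  refine ⟨hlt, ?_⟩
  rw [List.getD_eq_getElem img "" hlt, hrow']
  exact hlt2

theorem pv_diffs_shape : ∀ d ∈ pvDiffsA, -1 ≤ d.1 ∧ 0 ≤ d.2 := by decide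

theorem pv_anchor_iff (img : List String) (p : Int × Int) :
    (∀ c ∈ pvCells p.1 p.2, c ∈ pvCoords img) ↔
      ∃ i j : Nat, p = ((i : Int), (j : Int)) ∧ pvAnchor img i j := by
  constructor
  · intro h
    have hmem : ∀ d ∈ pvDiffsA, (p.1 + d.1, p.2 + d.2) ∈ pvCoords img := by
      intro d hd
      exact h _ (List.mem_map_of_mem hd)
    have h00 := (pv_mem_coords img _).mp (hmem ((0 : Int), (0 : Int)) (by decide))
    have hm1 := (pv_mem_coords img _).mp (hmem ((-1 : Int), (18 : Int)) (by decide))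
    have h11 := (pv_mem_coords img _).mp (hmem ((1 : Int), (1 : Int)) (by decide))
    have h19 := (pv_mem_coords img _).mp (hmem ((0 : Int), (19 : Int)) (by decide))
    obtain ⟨ha1, ha2, -⟩ := h00
    obtain ⟨hb1, -, -⟩ := hm1
    obtain ⟨-, -, hc3⟩ := h11
    obtain ⟨-, -, hd3⟩ := h19
    simp only at ha1 ha2 hb1 hc3 hd3
    have hlt11 := pv_char_lt img _ _ _ hc3 (by omega) (by omega)
    have hlt19 := pv_char_lt img _ _ _ hd3 (by omega) (by omega)
    refine ⟨p.1.toNat, p.2.toNat, ?_, ?_, ?_, ?_, ?_⟩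
    · have e1 : ((p.1.toNat : Nat) : Int) = p.1 := by omega
      have e2 : ((p.2.toNat : Nat) : Int) = p.2 := by omega
      rw [e1, e2]
    · omega
    · have := hlt11.1; omega
    · have h192 := hlt19.2
      have e : (p.1 + 0).toNat = p.1.toNat := by omega
      rw [e] at h192
      omega
    · rw [pvFound, List.all_eq_true]
      intro d hd
      rw [beq_iff_eq]
      obtain ⟨-, -, hcd⟩ := (pv_mem_coords img _).mp (hmem d hd)
      simp only at hcd
      have e1 : ((p.1.toNat : Nat) : Int) = p.1 := by omega
      have e2 : ((p.2.toNat : Nat) : Int) = p.2 := by omega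
      rw [e1, e2]
      exact hcd
  · rintro ⟨i, j, rfl, h1, h2, h3, h4⟩
    intro c hc
    rw [pvCells, List.mem_map] at hc
    obtain ⟨d, hd, rfl⟩ := hc
    rw [pv_mem_coords]
    obtain ⟨hs1, hs2⟩ := pv_diffs_shape d hd
    rw [pvFound, List.all_eq_true] at h4
    have := h4 d hd
    rw [beq_iff_eq] at this
    refine ⟨by simp only; omega, by simp only; omega, this⟩

theorem pv_diffs_eq : pvDiffsB = pvDiffsA := rfl

theorem pv_foldl_add_eq_update (i j : Int) (s : PySem.Set (Int × Int)) :
    pvDiffsA.foldl (fun e d => PySem.Set.add e (i + d.1, j + d.2)) s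
      = PySem.Set.update s (pvCells i j) := by
  rw [pvCells, PySem.Set.update, ← List.foldl_map]

set_option maxHeartbeats 2000000 in
theorem pv_mem_elms (img : List String) (q : Int × Int) :
    q ∈ (PySem.List.enumerate img).foldl (fun elms p =>
      if p.1 = 0 ∨ p.1 = (img.length : Int) - 1 then elms
      else
        ((PySem.List.pyRange 0 (p.2.toList.length : Int) 1).takeWhile
            (fun j => decide (j + 20 - 1 < (p.2.toList.length : Int)))).foldl
          (fun elms j =>
            let found := pvDiffsA.all (fun d => pvCharA img (p.1 + d.1) (j + d.2) == some '#')
            if found then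
              pvDiffsA.foldl (fun e d => PySem.Set.add e (p.1 + d.1, j + d.2))
                elms
            else elms) elms) PySem.Set.empty
    ↔ ∃ i j : Nat, pvAnchor img i j ∧ q ∈ pvCells (i : Int) (j : Int) := by
  rw [pv_mem_foldl_set (fun p q =>
      ¬(p.1 = 0 ∨ p.1 = (img.length : Int) - 1) ∧
        ∃ jI, jI ∈ (PySem.List.pyRange 0 (p.2.toList.length : Int) 1).takeWhile
            (fun j => decide (j + 20 - 1 < (p.2.toList.length : Int))) ∧
          pvFound img p.1 jI = true ∧ q ∈ pvCells p.1 jI)]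
  · constructor
    · rintro (h | ⟨p, hp, hskip, jI, hjI, hfound, hcell⟩)
      · cases h
      · rw [PySem.List.mem_enumerate_iff] at hp
        obtain ⟨k, hk, rfl⟩ := hp
        simp only [zero_add] at hskip hjI hfound hcell ⊢
        rw [pv_mem_takeWhile] at hjI
        obtain ⟨jN, rfl, hjN⟩ := hjI
        simp only [not_or] at hskip
        refine ⟨k, jN, ⟨?_, ?_, ?_, hfound⟩, hcell⟩
        · omega
        · have := hskip.2
          omega
        · rw [List.getD_eq_getElem img "" hk]
          exact hjN
    · rintro ⟨i, j, ⟨h1, h2, h3, h4⟩, hcell⟩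
      right
      have hi : i < img.length := by omega
      refine ⟨((i : Int), img[i]), ?_, ?_, (j : Int), ?_, h4, hcell⟩
      · rw [PySem.List.mem_enumerate_iff]
        exact ⟨i, hi, by simp⟩
      · simp only
        simp only [not_or]
        constructor <;> omega
      · simp only
        rw [pv_mem_takeWhile]
        refine ⟨j, rfl, ?_⟩
        rw [List.getD_eq_getElem img "" hi] at h3
        exact h3
  · intro s p q
    by_cases hskip : p.1 = 0 ∨ p.1 = (img.length : Int) - 1
    · rw [if_pos hskip]
      simp [hskip]
    · rw [if_neg hskip]
      rw [pv_mem_foldl_set (fun jI q => pvFound img p.1 jI = true ∧ q ∈ pvCells p.1 jI)]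
      · constructor
        · rintro (h | ⟨jI, hjI, hf, hc⟩)
          · exact Or.inl h
          · exact Or.inr ⟨hskip, jI, hjI, hf, hc⟩
        · rintro (h | ⟨-, jI, hjI, hf, hc⟩)
          · exact Or.inl h
          · exact Or.inr ⟨jI, hjI, hf, hc⟩
      · intro s' jI q'
        simp only
        by_cases hf : pvFound img p.1 jI = true
        · have hf' := hf
          rw [pvFound] at hf'
          rw [if_pos hf', pv_foldl_add_eq_update, PySem.Set.mem_update]
          simp [hf]
        · have hf' : ¬ (pvDiffsA.all (fun d => pvCharA img (p.1 + d.1, jI + d.2).1 (p.1 + d.1, jI + d.2).2 == some '#')) = true := by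
            rw [← pvFound]; exact hf
          simp only at hf'
          rw [if_neg (by exact fun hcon => hf (by rw [pvFound]; exact hcon))]
          simp [hf]

set_option maxHeartbeats 2000000 in
theorem pv_mem_occupied (img : List String) (q : Int × Int) :
    q ∈ (pvCoords img).foldl (fun occ p =>
      let cells := pvDiffsB.map (fun d => (p.1 + d.1, p.2 + d.2))
      if cells.all (fun cell => PySem.Set.contains (pvCoords img) cell) then PySem.Set.update occ cells
      else occ) PySem.Set.empty
    ↔ ∃ i j : Nat, pvAnchor img i j ∧ q ∈ pvCells (i : Int) (j : Int) := by
  rw [pv_mem_foldl_set (fun p q =>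
      (∀ c ∈ pvCells p.1 p.2, c ∈ pvCoords img) ∧ q ∈ pvCells p.1 p.2)]
  · constructor
    · rintro (h | ⟨p, hp, hall, hcell⟩)
      · cases h
      · obtain ⟨i, j, rfl, hanc⟩ := (pv_anchor_iff img p).mp hall
        exact ⟨i, j, hanc, hcell⟩
    · rintro ⟨i, j, hanc, hcell⟩
      right
      have hall : ∀ c ∈ pvCells ((i : Int), (j : Int)).1 ((i : Int), (j : Int)).2, c ∈ pvCoords img :=
        (pv_anchor_iff img _).mpr ⟨i, j, rfl, hanc⟩
      refine ⟨((i : Int), (j : Int)), ?_, hall, hcell⟩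
      have := hall ((i : Int) + 0, (j : Int) + 0) (by
        rw [pvCells]
        exact List.mem_map_of_mem (f := fun d => ((i : Int) + d.1, (j : Int) + d.2))
          (show ((0 : Int), (0 : Int)) ∈ pvDiffsA by decide))
      simpa using this
  · intro s p q'
    simp only [pv_diffs_eq]
    have hcells : pvDiffsA.map (fun d => (p.1 + d.1, p.2 + d.2)) = pvCells p.1 p.2 := rfl
    rw [hcells]
    by_cases hall : (pvCells p.1 p.2).all (fun cell => PySem.Set.contains (pvCoords img) cell) = true
    · rw [if_pos hall, PySem.Set.mem_update]
      have hin : ∀ c ∈ pvCells p.1 p.2, c ∈ pvCoords img := by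
        rw [List.all_eq_true] at hall
        intro c hc
        exact (PySem.Set.contains_iff _ _).mp (hall c hc)
      exact ⟨fun h => h.elim Or.inl (fun h2 => Or.inr ⟨hin, h2⟩),
             fun h => h.elim Or.inl (fun h2 => Or.inr h2.2)⟩
    · rw [if_neg hall]
      have hnot : ¬ ∀ c ∈ pvCells p.1 p.2, c ∈ pvCoords img := by
        intro hcon
        apply hall
        rw [List.all_eq_true]
        intro c hc
        exact (PySem.Set.contains_iff _ _).mpr (hcon c hc)
      exact ⟨Or.inl, fun h => h.elim id (fun h2 => absurd h2.1 hnot)⟩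

theorem pv_row_length : ∀ (cs : List Char) (iI s : Int),
    ((PySem.List.enumerate cs s).filterMap
        (fun q => if q.2 = '#' then some (iI, q.1) else none)).length
      = (cs.filter (fun c => c == '#')).length := by
  intro cs iI
  induction cs with
  | nil => intro s; simp [PySem.List.enumerate_nil]
  | cons c t ih =>
    intro s
    rw [PySem.List.enumerate_cons, List.filterMap_cons, List.filter_cons]
    by_cases hc : c = '#'
    · simp only [hc, if_true]
      simp [ih (s + 1)]
    · have hc' : (c == '#') = false := by simp [hc]
      simp only [if_neg hc, hc']
      simp [ih (s + 1)]

theorem pv_row_fst_snd : ∀ (cs : List Char) (iI s : Int) (x : Int × Int),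
    x ∈ (PySem.List.enumerate cs s).filterMap
        (fun q => if q.2 = '#' then some (iI, q.1) else none) → x.1 = iI ∧ s ≤ x.2 := by
  intro cs iI
  induction cs with
  | nil => intro s x hx; simp [PySem.List.enumerate_nil] at hx
  | cons c t ih =>
    intro s x hx
    rw [PySem.List.enumerate_cons, List.filterMap_cons] at hx
    by_cases hc : c = '#'
    · simp only [if_pos hc] at hx
      rcases List.mem_cons.mp hx with rfl | hx
      · exact ⟨rfl, by simp⟩
      · obtain ⟨h1, h2⟩ := ih (s + 1) x hx
        exact ⟨h1, by omega⟩
    · simp only [if_neg hc] at hx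
      obtain ⟨h1, h2⟩ := ih (s + 1) x hx
      exact ⟨h1, by omega⟩

theorem pv_row_pairwise : ∀ (cs : List Char) (iI s : Int),
    ((PySem.List.enumerate cs s).filterMap
        (fun q => if q.2 = '#' then some (iI, q.1) else none)).Pairwise
      (fun a b => a.2 < b.2) := by
  intro cs iI
  induction cs with
  | nil => intro s; simp [PySem.List.enumerate_nil]
  | cons c t ih =>
    intro s
    rw [PySem.List.enumerate_cons, List.filterMap_cons]
    by_cases hc : c = '#'
    · simp only [if_pos hc]
      refine List.Pairwise.cons ?_ (ih (s + 1))
      intro y hy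
      have := (pv_row_fst_snd t iI (s + 1) y hy).2
      simp only
      omega
    · simp only [if_neg hc]
      exact ih (s + 1)

theorem pv_nodup_coordsList (img : List String) :
    ((PySem.List.enumerate img).flatMap (fun p =>
      (PySem.List.enumerate p.2.toList).filterMap (fun q =>
        if q.2 = '#' then some (p.1, q.1) else none))).Nodup := by
  have key : ∀ (l : List (Int × String)), l.Pairwise (fun p q => p.1 < q.1) →
      (l.flatMap (fun p =>
        (PySem.List.enumerate p.2.toList).filterMap (fun q =>
          if q.2 = '#' then some (p.1, q.1) else none))).Nodup := by
    intro l
    induction l with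
    | nil => intro _; simp
    | cons p t ih =>
      intro hpw
      rw [List.flatMap_cons, List.nodup_append]
      obtain ⟨hhead, htail⟩ := List.pairwise_cons.mp hpw
      refine ⟨?_, ih htail, ?_⟩
      · refine List.Pairwise.imp ?_ (pv_row_pairwise p.2.toList p.1 0)
        intro a b hab heq
        rw [heq] at hab
        exact lt_irrefl _ hab
      · intro a ha b hb heq
        have ha1 := (pv_row_fst_snd _ _ _ a ha).1
        rw [List.mem_flatMap] at hb
        obtain ⟨p', hp', hb'⟩ := hb
        have hb1 := (pv_row_fst_snd _ _ _ b hb').1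
        have hlt := hhead p' hp'
        rw [heq] at ha1
        omega
  exact key _ (PySem.List.pairwise_lt_enumerate img 0)

theorem pv_coords_length (img : List String) :
    ((pvCoords img).length : Int)
      = (img.map (fun row => ((row.toList.filter (fun c => c == '#')).length : Int))).sum := by
  rw [pvCoords, PySem.Set.ofList_eq_self_of_nodup _ (pv_nodup_coordsList img)]
  rw [List.length_flatMap]
  have hmap : ∀ (xs : List String) (s : Int),
      (PySem.List.enumerate xs s).map (fun p =>
        ((PySem.List.enumerate p.2.toList).filterMap (fun q =>
          if q.2 = '#' then some (p.1, q.1) else none)).length)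
        = xs.map (fun row => (row.toList.filter (fun c => c == '#')).length) := by
    intro xs
    induction xs with
    | nil => intro s; simp [PySem.List.enumerate_nil]
    | cons r t ih =>
      intro s
      rw [PySem.List.enumerate_cons, List.map_cons, List.map_cons, ih (s + 1)]
      simp only
      rw [pv_row_length r.toList s 0]
  rw [hmap img 0, Nat.cast_list_sum, List.map_map]
  rfl

theorem pv_nodup_foldl {α β : Type} (f : List β → α → List β)
    (H : ∀ s x, s.Nodup → (f s x).Nodup) :
    ∀ (l : List α) (s0 : List β), s0.Nodup → (l.foldl f s0).Nodup := by
  intro l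
  induction l with
  | nil => exact fun _ h => h
  | cons x t ih => intro s0 h0; exact ih _ (H _ _ h0)

theorem pv_nodup_elms (img : List String) :
    ((PySem.List.enumerate img).foldl (fun elms p =>
      if p.1 = 0 ∨ p.1 = (img.length : Int) - 1 then elms
      else
        ((PySem.List.pyRange 0 (p.2.toList.length : Int) 1).takeWhile
            (fun j => decide (j + 20 - 1 < (p.2.toList.length : Int)))).foldl
          (fun elms j =>
            let found := pvDiffsA.all (fun d => pvCharA img (p.1 + d.1) (j + d.2) == some '#')
            if found then
              pvDiffsA.foldl (fun e d => PySem.Set.add e (p.1 + d.1, j + d.2))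
                elms
            else elms) elms) PySem.Set.empty).Nodup := by
  apply pv_nodup_foldl
  · intro s p hs
    simp only
    by_cases hskip : p.1 = 0 ∨ p.1 = (img.length : Int) - 1
    · rw [if_pos hskip]; exact hs
    · rw [if_neg hskip]
      apply pv_nodup_foldl
      · intro s' j hs'
        by_cases hf : pvDiffsA.all (fun d => pvCharA img (p.1 + d.1) (j + d.2) == some '#') = true
        · rw [if_pos hf, pv_foldl_add_eq_update]
          exact PySem.Set.nodup_update _ _ hs'
        · rw [if_neg hf]; exact hs'
      · exact hs
  · exact List.nodup_nil

theorem pv_nodup_occupied (img : List String) :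
    ((pvCoords img).foldl (fun occ p =>
      let cells := pvDiffsB.map (fun d => (p.1 + d.1, p.2 + d.2))
      if cells.all (fun cell => PySem.Set.contains (pvCoords img) cell) then PySem.Set.update occ cells
      else occ) PySem.Set.empty).Nodup := by
  apply pv_nodup_foldl
  · intro s p hs
    simp only
    by_cases hall : (pvDiffsB.map (fun d => (p.1 + d.1, p.2 + d.2))).all
        (fun cell => PySem.Set.contains (pvCoords img) cell) = true
    · rw [if_pos hall]
      exact PySem.Set.nodup_update _ _ hs
    · rw [if_neg hall]; exact hs
  · exact List.nodup_nil

theorem pv_final (img : List String) : search_for_monster img = search_for_monster_alt img := by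
  have hperm := (List.perm_ext_iff_of_nodup (pv_nodup_elms img) (pv_nodup_occupied img)).mpr
      (fun q => (pv_mem_elms img q).trans ((pv_mem_occupied img q).symm))
  have hlen := hperm.length_eq
  unfold search_for_monster search_for_monster_alt
  simp only
  rw [hlen, ← pv_coords_length]

-- ===== VERDICT (by name: the statement is the Claim_ definition above) =====
theorem search_for_monster_spec : Claim_equal_search_for_monster := by
  intro img _ _
  exact pv_final img

@[simp] theorem search_for_monster_raises : Claim_raises_search_for_monster := by
  unfold Claim_raises_search_for_monster
  constructor
  · intro img _ hr hpre
    obtain ⟨i, hi, h1, h2, j, hj, h19, k, hk, hpref, hnone⟩ := hr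
    exact (hpre i hi h1 h2 j hj h19 k hk hpref) hnone
  · exact ⟨by decide, by decide, by decide⟩
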